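-- pv_equiv track=rewrite | github.com/vigneshkumarv/MSDS-532 | problem_6.py | hand_update
-- ===== SOURCE A (Python) =====
-- def hand_update(hand, word):
--     """
--     After word played and validated,
--     removes letters in word from hand
--     if hand has 2 a's & an 'a' was used,
--     this updates hand to 1 'a'
--     word: string
--     hand: dictionary (string -> int)
--     returns: dictionary (string -> int)
--     """
--     word_len = len(word)                         # Get word length
--     if word_len == 0:
--         return hand                              # Return hand if word length is zero
--     for letter in word:                          # Iterate through the dictionary and update it based on letters used in word
--         if hand.get(letter, 0):
--             hand[letter] -= 1
--     for index in list(hand.keys()):              # Iterate through the dictionary and remove letters which have value zero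
--         if hand[index] == 0:
--             del hand[index]
--     return hand
-- ===== SOURCE B (Python) =====
-- def hand_update(hand, word):
--     """Same behaviour on nonnegative-count hands; mutates hand in place like A."""
--     if not word:
--         return hand
--     wc = {}
--     for ch in word:
--         wc[ch] = wc.get(ch, 0) + 1
--     for letter in list(hand):
--         new = hand[letter] - wc.get(letter, 0)
--         if new <= 0:
--             del hand[letter]
--         else:
--             hand[letter] = new
--     return hand
-- ===== Notes on version B (the rewrite author's own statement) =====
-- stated objective: idiomatic
-- what changed: Instead of A's per-character decrement loop over the word followed by a second delete-zeros sweep over the hand, B builds a frequency table of the word once and makes a single pass over the hand, subtracting each letter's count and deleting a key as soon as its new count is not positive.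
-- outside the precondition, e.g. on hand_update({'a': -1}, 'a'): A returns {'a': -2}, B returns {}
import Mathlib
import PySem

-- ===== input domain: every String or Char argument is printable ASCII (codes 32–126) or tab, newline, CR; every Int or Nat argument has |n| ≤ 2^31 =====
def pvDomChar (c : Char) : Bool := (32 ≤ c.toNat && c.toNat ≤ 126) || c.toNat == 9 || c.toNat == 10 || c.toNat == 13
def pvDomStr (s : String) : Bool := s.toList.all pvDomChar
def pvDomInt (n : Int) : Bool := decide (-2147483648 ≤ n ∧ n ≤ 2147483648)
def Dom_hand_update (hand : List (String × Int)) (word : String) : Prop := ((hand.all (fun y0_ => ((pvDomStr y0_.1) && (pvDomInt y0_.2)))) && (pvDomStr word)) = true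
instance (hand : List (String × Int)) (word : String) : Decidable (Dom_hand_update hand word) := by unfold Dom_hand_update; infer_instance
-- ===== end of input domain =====

-- B replaces A's per-character decrement loop + delete-zeros sweep by one frequency table of the
-- word and a single pass over the hand (idiomatic, same cost).  Both A and B mutate `hand` in
-- place in Python and return it; the equivalence proved here is about the returned mapping.

-- ===== PORT A =====
def hand_update (hand : List (String × Int)) (word : String) : List (String × Int) :=
  let d := PySem.Dict.ofList hand
  let wordLen := PySem.Str.len word
  if wordLen = 0 then d.items
  else
    let d := word.toList.foldl (fun d c =>
      if d.getD (String.ofList [c]) 0 ≠ 0 then d.insert (String.ofList [c]) (d.getD (String.ofList [c]) 0 - 1)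
      else d) d
    let d := d.keys.foldl (fun d k => if d.getD k 0 = 0 then d.erase k else d) d
    d.items

-- ===== PORT B =====
def hand_update_alt (hand : List (String × Int)) (word : String) : List (String × Int) :=
  let d := PySem.Dict.ofList hand
  if word.toList = [] then d.items
  else
    let wc : PySem.Dict String Int :=
      (word.toList.map (fun c => String.ofList [c])).foldl
        (fun w ch => w.insert ch (w.getD ch 0 + 1)) PySem.Dict.empty
    let d := d.keys.foldl (fun d k =>
      if d.getD k 0 - wc.getD k 0 ≤ 0 then d.erase k else d.insert k (d.getD k 0 - wc.getD k 0)) d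
    d.items

-- ===== PRECONDITION & SPEC =====
-- Pre_ restricts to the function's documented domain ("hand: dictionary (string -> int)" of letter
-- COUNTS): every count nonnegative.  On out-of-domain negative counts neither behaviour is
-- specified and the two programs legitimately differ (A keeps decrementing, B deletes the key).
def Pre_hand_update (hand : List (String × Int)) (word : String) : Prop :=
  ∀ p ∈ hand, 0 ≤ p.2
instance (hand : List (String × Int)) (word : String) : Decidable (Pre_hand_update hand word) := by
  unfold Pre_hand_update; infer_instance
def pvWitness_hand_update : (List (String × Int)) × String := ([("a", 2), ("b", 1)], "ab")
def Spec_hand_update (hand : List (String × Int)) (word : String) (out : List (String × Int)) : Prop := out = hand_update_alt hand word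
instance (hand : List (String × Int)) (word : String) (out : List (String × Int)) : Decidable (Spec_hand_update hand word out) := by unfold Spec_hand_update; infer_instance

-- ===== CLAIM (what is proved, stated in full; the proofs are below) =====
def Claim_equal_hand_update : Prop := ∀ (hand : List (String × Int)) (word : String), Dom_hand_update hand word → Pre_hand_update hand word → Spec_hand_update hand word (hand_update hand word)

-- ===== LEMMAS AND PROOFS =====

-- every item of `Dict.ofList l` is literally a pair of l (so Pre_ transfers to the dict's values)
theorem hu_mem_foldl_insert (l : List (String × Int)) (d : PySem.Dict String Int)
    (p : String × Int) (h : p ∈ (l.foldl (fun d q => d.insert q.1 q.2) d).items) :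
    p ∈ d.items ∨ p ∈ l := by
  induction l generalizing d with
  | nil => exact Or.inl h
  | cons q l ih =>
    rcases ih _ h with h' | h'
    · rcases (PySem.Dict.mem_items_insert _ _ _ _).1 h' with h'' | h''
      · right; simp [h'']
      · exact Or.inl h''.1
    · exact Or.inr (List.mem_cons_of_mem _ h')

theorem hu_mem_ofList (l : List (String × Int)) (p : String × Int)
    (h : p ∈ (PySem.Dict.ofList l).items) : p ∈ l := by
  rcases hu_mem_foldl_insert l PySem.Dict.empty p h with h' | h'
  · simp [PySem.Dict.empty] at h'
  · exact h'

-- A's first loop: each key's value becomes max (v - count) 0 (given nonnegative values)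
theorem hu_loopA (cs : List Char) (d : PySem.Dict String Int)
    (hnd : d.keys.Nodup) (hv : ∀ p ∈ d.items, 0 ≤ p.2) :
    (cs.foldl (fun d c =>
      if d.getD (String.ofList [c]) 0 ≠ 0 then d.insert (String.ofList [c]) (d.getD (String.ofList [c]) 0 - 1)
      else d) d).items
    = d.items.map (fun p => (p.1, max (p.2 - (((cs.map (fun c => String.ofList [c])).count p.1 : Int))) 0)) := by
  induction cs generalizing d with
  | nil =>
    symm
    have h1 : ∀ p ∈ d.items,
        (p.1, max (p.2 - (((([] : List Char).map (fun c => String.ofList [c])).count p.1 : Int))) 0) = id p := by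
      intro p hp
      have h2 := hv p hp
      simp only [List.map_nil, List.count_nil, Int.natCast_zero, sub_zero, id]
      have h3 : max p.2 0 = p.2 := by omega
      rw [h3]
    rw [List.map_congr_left h1, List.map_id, List.foldl_nil]
  | cons c cs ih =>
    rw [List.foldl_cons]
    by_cases h : d.getD (String.ofList [c]) 0 ≠ 0
    · have hcon : d.contains (String.ofList [c]) = true := by
        by_contra hc
        exact h (PySem.Dict.getD_of_not_contains d 0 (by simpa using hc))
      have hitems : (d.insert (String.ofList [c]) (d.getD (String.ofList [c]) 0 - 1)).items
          = d.items.map (fun p => if p.1 == String.ofList [c]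
              then (String.ofList [c], d.getD (String.ofList [c]) 0 - 1) else p) :=
        PySem.Dict.items_insert_of_contains _ _ hcon
      have hkeys : (d.insert (String.ofList [c]) (d.getD (String.ofList [c]) 0 - 1)).keys = d.keys :=
        PySem.Dict.keys_insert_of_contains _ _ hcon
      have hv' : ∀ p ∈ (d.insert (String.ofList [c]) (d.getD (String.ofList [c]) 0 - 1)).items, 0 ≤ p.2 := by
        rw [hitems]
        intro p hp
        rcases List.mem_map.mp hp with ⟨q, hq, hqe⟩
        by_cases hqk : q.1 = String.ofList [c]
        · have hq2 : d.getD q.1 0 = q.2 := PySem.Dict.getD_of_mem_items d (by simpa using hq) hnd 0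
          have hq0 := hv q hq
          rw [← hqe]
          simp only [hqk, BEq.rfl, if_true]
          rw [hqk] at hq2
          omega
        · rw [← hqe]
          simp only [hqk, beq_iff_eq]
          exact hv q hq
      rw [if_pos h, ih _ (hkeys ▸ hnd) hv', hitems, List.map_map]
      apply List.map_congr_left
      intro p hp
      by_cases hpk : p.1 = String.ofList [c]
      · have hp2 : d.getD p.1 0 = p.2 := PySem.Dict.getD_of_mem_items d (by simpa using hp) hnd 0
        have hp0 := hv p hp
        rw [hpk] at hp2
        simp only [Function.comp, BEq.rfl, if_true, List.map_cons, List.count_cons, hpk]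
        have hne : d.getD (String.ofList [c]) 0 ≠ 0 := h
        rw [Prod.mk.injEq]
        refine ⟨rfl, ?_⟩
        rw [hp2]
        push_cast
        omega
      · have hks : ¬ (String.ofList [c] = p.1) := fun e => hpk e.symm
        simp only [Function.comp, beq_iff_eq, if_neg hpk, List.map_cons, List.count_cons, hks,
          if_false, decide_eq_true_eq]
        rw [Prod.mk.injEq]
        refine ⟨rfl, ?_⟩
        push_cast
        omega
    · rw [if_neg h, ih _ hnd hv]
      apply List.map_congr_left
      intro p hp
      by_cases hpk : p.1 = String.ofList [c]
      · have hp2 : d.getD p.1 0 = p.2 := PySem.Dict.getD_of_mem_items d (by simpa using hp) hnd 0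
        rw [hpk] at hp2
        have hz : p.2 = 0 := by rw [← hp2, not_not.mp h]
        simp only [List.map_cons, List.count_cons, beq_iff_eq, hpk, hz]
        rw [Prod.mk.injEq]
        refine ⟨rfl, ?_⟩
        push_cast
        omega
      · have hks : ¬ (String.ofList [c] = p.1) := fun e => hpk e.symm
        simp only [List.map_cons, List.count_cons, beq_iff_eq, hks, if_false]
        rw [Prod.mk.injEq]
        refine ⟨rfl, ?_⟩
        push_cast
        omega

-- A's second loop (over a nodup key snapshot): drop exactly the zero-valued listed keys
theorem hu_loopE (ks : List String) (d : PySem.Dict String Int)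
    (hks : ks.Nodup) (hnd : d.keys.Nodup) :
    (ks.foldl (fun d k => if d.getD k 0 = 0 then d.erase k else d) d).items
    = d.items.filterMap (fun p => if p.1 ∈ ks ∧ p.2 = 0 then none else some p) := by
  induction ks generalizing d with
  | nil => simp
  | cons k ks ih =>
    have hknotin : k ∉ ks := (List.nodup_cons.mp hks).1
    have hksn : ks.Nodup := (List.nodup_cons.mp hks).2
    rw [List.foldl_cons]
    by_cases h : d.getD k 0 = 0
    · have herase : (d.erase k).items = d.items.filter (fun p => !(p.1 == k)) := rfl
      have hnd' : (d.erase k).keys.Nodup := by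
        have hsub : (d.erase k).items.Sublist d.items := by
          rw [herase]; exact List.filter_sublist
        exact hnd.sublist (hsub.map _)
      rw [if_pos h, ih _ hksn hnd', herase, List.filterMap_filter]
      apply List.filterMap_congr
      intro p hp
      by_cases hpk : p.1 = k
      · have hp2 : d.getD p.1 0 = p.2 :=
          PySem.Dict.getD_of_mem_items d (by simpa using hp) hnd 0
        have : p.2 = 0 := by rw [← hp2, hpk, h]
        simp [hpk, this]
      · simp [hpk]
    · rw [if_neg h, ih _ hksn hnd]
      apply List.filterMap_congr
      intro p hp
      by_cases hpk : p.1 = k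
      · have hp2 : d.getD p.1 0 = p.2 :=
          PySem.Dict.getD_of_mem_items d (by simpa using hp) hnd 0
        have hne : ¬ p.2 = 0 := by rw [← hp2, hpk]; exact h
        simp [hpk, hne, hknotin]
      · simp [hpk]

-- B's loop (over a nodup key snapshot): subtract g and drop nonpositive results, for 0 ≤ g
theorem hu_loopB (g : String → Int) (hg : ∀ k, 0 ≤ g k) (ks : List String)
    (d : PySem.Dict String Int) (hks : ks.Nodup) (hnd : d.keys.Nodup) :
    (ks.foldl (fun d k =>
      if d.getD k 0 - g k ≤ 0 then d.erase k else d.insert k (d.getD k 0 - g k)) d).items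
    = d.items.filterMap (fun p => if p.1 ∈ ks then
        (if p.2 - g p.1 ≤ 0 then none else some (p.1, p.2 - g p.1)) else some p) := by
  induction ks generalizing d with
  | nil => simp
  | cons k ks ih =>
    have hknotin : k ∉ ks := (List.nodup_cons.mp hks).1
    have hksn : ks.Nodup := (List.nodup_cons.mp hks).2
    rw [List.foldl_cons]
    by_cases h : d.getD k 0 - g k ≤ 0
    · have herase : (d.erase k).items = d.items.filter (fun p => !(p.1 == k)) := rfl
      have hnd' : (d.erase k).keys.Nodup := by
        have hsub : (d.erase k).items.Sublist d.items := by
          rw [herase]; exact List.filter_sublist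
        exact hnd.sublist (hsub.map _)
      rw [if_pos h, ih _ hksn hnd', herase, List.filterMap_filter]
      apply List.filterMap_congr
      intro p hp
      by_cases hpk : p.1 = k
      · have hp2 : d.getD p.1 0 = p.2 :=
          PySem.Dict.getD_of_mem_items d (by simpa using hp) hnd 0
        have hle : p.2 - g p.1 ≤ 0 := by rw [← hp2, hpk]; exact hpk ▸ h
        rw [hpk] at hle
        simp only [hpk]
        simp [hle]
      · simp [hpk]
    · have hcon : d.contains k = true := by
        by_contra hc
        have h0 : d.getD k 0 = 0 :=
          PySem.Dict.getD_of_not_contains d 0 (by simpa using hc)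
        rw [h0] at h
        have := hg k
        omega
      have hitems : (d.insert k (d.getD k 0 - g k)).items
          = d.items.map (fun p => if p.1 == k then (k, d.getD k 0 - g k) else p) :=
        PySem.Dict.items_insert_of_contains _ _ hcon
      have hnd' : (d.insert k (d.getD k 0 - g k)).keys.Nodup := by
        rw [PySem.Dict.keys_insert_of_contains _ _ hcon]; exact hnd
      rw [if_neg h, ih _ hksn hnd', hitems, List.filterMap_map]
      apply List.filterMap_congr
      intro p hp
      by_cases hpk : p.1 = k
      · have hp2 : d.getD p.1 0 = p.2 :=
          PySem.Dict.getD_of_mem_items d (by simpa using hp) hnd 0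
        have hgt : ¬ p.2 - g p.1 ≤ 0 := by rw [← hp2, hpk]; exact hpk ▸ h
        simp only [Function.comp]
        rw [← hpk] at hcon hitems ⊢
        simp [hpk, hknotin, ← hp2]
        omega
      · simp [hpk]

-- ===== VERDICT (by name: the statement is the Claim_ definition above) =====
theorem hand_update_spec : Claim_equal_hand_update := by
  intro hand word _hdom hpre
  unfold Spec_hand_update
  simp only [hand_update, hand_update_alt]
  have hnd0 : (PySem.Dict.ofList hand).keys.Nodup := PySem.Dict.nodup_keys_ofList hand
  have hv0 : ∀ p ∈ (PySem.Dict.ofList hand).items, 0 ≤ p.2 :=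
    fun p hp => hpre p (hu_mem_ofList hand p hp)
  by_cases hw : word.toList = []
  · simp [PySem.Str.len, hw]
  · have hlen : ¬ PySem.Str.len word = 0 := by
      simp only [PySem.Str.len, Int.natCast_eq_zero, List.length_eq_zero_iff]
      exact hw
    rw [if_neg hlen, if_neg hw]
    have hA := hu_loopA word.toList (PySem.Dict.ofList hand) hnd0 hv0
    have hkA : (word.toList.foldl (fun d c =>
        if d.getD (String.ofList [c]) 0 ≠ 0 then d.insert (String.ofList [c]) (d.getD (String.ofList [c]) 0 - 1)
        else d) (PySem.Dict.ofList hand)).keys = (PySem.Dict.ofList hand).keys := by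
      show (word.toList.foldl _ (PySem.Dict.ofList hand)).items.map Prod.fst
        = (PySem.Dict.ofList hand).items.map Prod.fst
      rw [hA, List.map_map]
      exact List.map_congr_left (fun p _ => rfl)
    have hE := hu_loopE ((word.toList.foldl (fun d c =>
        if d.getD (String.ofList [c]) 0 ≠ 0 then d.insert (String.ofList [c]) (d.getD (String.ofList [c]) 0 - 1)
        else d) (PySem.Dict.ofList hand)).keys) _ (hkA ▸ hnd0) (hkA ▸ hnd0)
    rw [hE, hA, hkA, List.filterMap_map]
    have hwc : (word.toList.map (fun c => String.ofList [c])).foldl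
        (fun w ch => w.insert ch (w.getD ch 0 + 1)) PySem.Dict.empty
        = PySem.Dict.counter (word.toList.map (fun c => String.ofList [c])) :=
      PySem.Dict.foldl_insert_getD_add_one_eq_counter _
    rw [hwc]
    simp only [PySem.Dict.getD_counter]
    have hB := hu_loopB (fun k => ((word.toList.map (fun c => String.ofList [c])).count k : Int))
      (fun k => Int.natCast_nonneg _) (PySem.Dict.ofList hand).keys (PySem.Dict.ofList hand)
      hnd0 hnd0
    rw [hB]
    apply List.filterMap_congr
    intro p hp
    have hmem : p.1 ∈ (PySem.Dict.ofList hand).keys := List.mem_map.mpr ⟨p, hp, rfl⟩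
    have hp0 := hv0 p hp
    by_cases hle : p.2 - ((word.toList.map (fun c => String.ofList [c])).count p.1 : Int) ≤ 0
    · have hmax : max (p.2 - ((word.toList.map (fun c => String.ofList [c])).count p.1 : Int)) 0 = 0 := by
        omega
      simp [Function.comp, hmax, hmem, hle]
    · have hmax : max (p.2 - ((word.toList.map (fun c => String.ofList [c])).count p.1 : Int)) 0
          = p.2 - ((word.toList.map (fun c => String.ofList [c])).count p.1 : Int) := by omega
      simp [Function.comp, hmem, hle]
      omega
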